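-- pv_equiv track=rewrite | github.com/ducminhgd/leetcode-solutions | medium/2975/main.py | akit_kumar
-- ===== SOURCE A (Python) =====
-- MOD = 10**9 + 7
--
-- def akit_kumar(m: int, n: int, h_fences: list[int], v_fences: list[int]) -> int:
--     """
--     Solution from AkitKumar on leetcode
--     https://leetcode.com/problems/maximum-square-area-by-removing-fences-from-a-field/solutions/7498260/find-biggest-square-from-fence-gaps-begi-8o9m/
--     """
--
--     def prep(cuts: list[int], limit: int) -> list[int]:
--         return sorted([1] + cuts + [limit])
--
--     h = prep(h_fences, m)
--     v = prep(v_fences, n)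
--
--     gap_set = set()
--     for i in range(len(h)):
--         for j in range(i + 1, len(h)):
--             gap_set.add(h[j] - h[i])
--
--     best = 0
--     for i in range(len(v)):
--         for j in range(i + 1, len(v)):
--             d = v[j] - v[i]
--             if d > best and d in gap_set:
--                 best = d
--
--     if best == 0:
--         return -1
--     return (best * best) % MOD
-- ===== SOURCE B (Python) =====
-- MOD = 10**9 + 7
--
-- def akit_kumar(m: int, n: int, h_fences: list[int], v_fences: list[int]) -> int:
--     """Try each distinct horizontal gap, largest first, and test whether it is
--     realizable on the vertical axis by a shifted position-set membership test;
--     return on the first hit (no vertical gap enumeration, no running max)."""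
--     hs = set(h_fences) | {1, m}
--     vs = set(v_fences) | {1, n}
--     for d in sorted({b - a for a in hs for b in hs if b > a}, reverse=True):
--         if any(p + d in vs for p in vs):
--             return d * d % MOD
--     return -1
-- ===== Notes on version B (the rewrite author's own statement) =====
-- stated objective: alternative
-- what changed: B never enumerates vertical gap pairs: it scans the distinct horizontal gaps in decreasing order and tests each candidate d for vertical realizability via a shifted position-set membership test (some p with p+d in the vertical position set), returning at the first hit instead of keeping A's running max over all vertical pairs filtered by the horizontal gap set.
import Mathlib
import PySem

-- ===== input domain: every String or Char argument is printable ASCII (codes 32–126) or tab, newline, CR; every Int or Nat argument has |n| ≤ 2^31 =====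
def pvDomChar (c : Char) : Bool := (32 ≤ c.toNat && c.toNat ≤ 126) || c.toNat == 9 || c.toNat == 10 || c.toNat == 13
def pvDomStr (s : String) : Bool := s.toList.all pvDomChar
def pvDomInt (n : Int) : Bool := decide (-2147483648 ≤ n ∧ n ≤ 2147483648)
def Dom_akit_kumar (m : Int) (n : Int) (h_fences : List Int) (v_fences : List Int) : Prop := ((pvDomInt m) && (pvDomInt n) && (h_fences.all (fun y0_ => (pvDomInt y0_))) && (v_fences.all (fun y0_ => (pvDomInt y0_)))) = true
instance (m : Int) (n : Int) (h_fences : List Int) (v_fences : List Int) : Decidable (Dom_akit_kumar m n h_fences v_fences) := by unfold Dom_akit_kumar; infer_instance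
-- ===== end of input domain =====

-- B scans the distinct horizontal gaps in decreasing order and tests each for vertical
-- realizability by a shifted position-set membership test, returning at the first hit,
-- instead of A's enumeration of all vertical pairs with a running max (objective: alternative).

-- ===== PORT A =====
def akit_kumar (m : Int) (n : Int) (h_fences : List Int) (v_fences : List Int) : Int :=
  let h := PySem.List.sorted (1 :: h_fences ++ [m]) (fun x => x)
  let v := PySem.List.sorted (1 :: v_fences ++ [n]) (fun x => x)
  let gapSet : PySem.Set Int :=
    (PySem.List.pyRange 0 (PySem.List.len h)).foldl
      (fun s i =>
        (PySem.List.pyRange (i + 1) (PySem.List.len h)).foldl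
          (fun s j => PySem.Set.add s (PySem.List.pyGetD h j 0 - PySem.List.pyGetD h i 0)) s)
      PySem.Set.empty
  let best : Int :=
    (PySem.List.pyRange 0 (PySem.List.len v)).foldl
      (fun b i =>
        (PySem.List.pyRange (i + 1) (PySem.List.len v)).foldl
          (fun b j =>
            let d := PySem.List.pyGetD v j 0 - PySem.List.pyGetD v i 0
            if b < d ∧ PySem.Set.contains gapSet d = true then d else b) b)
      0
  if best = 0 then -1 else PySem.Int.mod (best * best) (10 ^ 9 + 7)

-- ===== PORT B =====
-- the 'for d in …: if any(…): return …' loop of Source B (early return)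
def pvScan (vs : PySem.Set Int) : List Int → Int
  | [] => -1
  | d :: rest =>
      if vs.any (fun p => PySem.Set.contains vs (p + d)) then
        PySem.Int.mod (d * d) (10 ^ 9 + 7)
      else pvScan vs rest

def akit_kumar_alt (m : Int) (n : Int) (h_fences : List Int) (v_fences : List Int) : Int :=
  let hs := PySem.Set.union (PySem.Set.ofList h_fences) (PySem.Set.ofList [1, m])
  let vs := PySem.Set.union (PySem.Set.ofList v_fences) (PySem.Set.ofList [1, n])
  let gaps := PySem.Set.ofList
    (hs.flatMap (fun a => (hs.filter (fun b => decide (a < b))).map (fun b => b - a)))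
  pvScan vs (PySem.List.sorted gaps (fun x => x) true)

-- ===== PRECONDITION & SPEC =====
def Spec_akit_kumar (m : Int) (n : Int) (h_fences : List Int) (v_fences : List Int) (out : Int) : Prop := out = akit_kumar_alt m n h_fences v_fences
instance (m : Int) (n : Int) (h_fences : List Int) (v_fences : List Int) (out : Int) : Decidable (Spec_akit_kumar m n h_fences v_fences out) := by unfold Spec_akit_kumar; infer_instance

-- ===== CLAIM (what is proved, stated in full; the proofs are below) =====
def Claim_equal_akit_kumar : Prop := ∀ (m : Int) (n : Int) (h_fences : List Int) (v_fences : List Int), Dom_akit_kumar m n h_fences v_fences → Spec_akit_kumar m n h_fences v_fences (akit_kumar m n h_fences v_fences)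

-- ===== LEMMAS AND PROOFS =====

-- the multiset of gaps A's nested h-loop inserts, as a flat list (proof-only helper)
def pvGapList (c : List Int) : List Int :=
  (PySem.List.enumerate c).flatMap
    (fun p => (PySem.List.slice c (some (p.1 + 1)) none).map (fun b => b - p.2))

-- A's nested gap-collection loop builds exactly set(pvGapList c).
theorem gapfold_eq (c : List Int) :
    (PySem.List.pyRange 0 (PySem.List.len c)).foldl
      (fun s i =>
        (PySem.List.pyRange (i + 1) (PySem.List.len c)).foldl
          (fun s j => PySem.Set.add s (PySem.List.pyGetD c j 0 - PySem.List.pyGetD c i 0)) s)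
      PySem.Set.empty
    = PySem.Set.ofList (pvGapList c) := by
  unfold pvGapList
  rw [PySem.Set.ofList_eq_foldl, List.foldl_flatMap,
    PySem.List.enumerate_eq_map_pyRange c 0, List.foldl_map]
  show List.foldl _ ([] : List Int) _ = _
  apply PySem.List.foldl_congr_mem
  intro acc i hi
  have h0i : (0:Int) ≤ i := (PySem.List.mem_pyRange_one.mp hi).1
  rw [List.foldl_map, PySem.List.slice_from c (show (0:Int) ≤ i + 1 by omega),
    PySem.List.foldl_pyRange_pyGetD c 0
      (fun s b => PySem.Set.add s (b - PySem.List.pyGetD c i 0)) acc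
      (show (0:Int) ≤ i + 1 by omega)]

-- A's vertical loop is the fold of its update step over pvGapList v.
theorem bestfold_eq (c : List Int) (S : PySem.Set Int) (b0 : Int) :
    (PySem.List.pyRange 0 (PySem.List.len c)).foldl
      (fun b i =>
        (PySem.List.pyRange (i + 1) (PySem.List.len c)).foldl
          (fun b j =>
            let d := PySem.List.pyGetD c j 0 - PySem.List.pyGetD c i 0
            if b < d ∧ PySem.Set.contains S d = true then d else b) b)
      b0
    = (pvGapList c).foldl
        (fun b d => if b < d ∧ PySem.Set.contains S d = true then d else b) b0 := by
  unfold pvGapList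
  rw [List.foldl_flatMap, PySem.List.enumerate_eq_map_pyRange c 0, List.foldl_map]
  apply PySem.List.foldl_congr_mem
  intro acc i hi
  have h0i : (0:Int) ≤ i := (PySem.List.mem_pyRange_one.mp hi).1
  rw [List.foldl_map, PySem.List.slice_from c (show (0:Int) ≤ i + 1 by omega),
    PySem.List.foldl_pyRange_pyGetD c 0
      (fun b x => if b < x - PySem.List.pyGetD c i 0 ∧
          PySem.Set.contains S (x - PySem.List.pyGetD c i 0) = true
        then x - PySem.List.pyGetD c i 0 else b) acc
      (show (0:Int) ≤ i + 1 by omega)]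

-- running-max fold facts
theorem fold_le (S : PySem.Set Int) (L : List Int) (b : Int) :
    b ≤ L.foldl (fun b d => if b < d ∧ PySem.Set.contains S d = true then d else b) b := by
  induction L generalizing b with
  | nil => exact le_refl _
  | cons x t ih =>
    simp only [List.foldl_cons]
    split_ifs with hx
    · exact le_trans (le_of_lt hx.1) (ih x)
    · exact ih b

theorem fold_ub (S : PySem.Set Int) (L : List Int) (b : Int) :
    ∀ d ∈ L, PySem.Set.contains S d = true →
      d ≤ L.foldl (fun b d => if b < d ∧ PySem.Set.contains S d = true then d else b) b := by
  induction L generalizing b with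
  | nil => intro d hd; simp at hd
  | cons x t ih =>
    intro d hd hdS
    rcases List.mem_cons.mp hd with rfl | hdt
    · simp only [List.foldl_cons]
      split_ifs with hx
      · exact fold_le S t d
      · have : ¬ b < d := fun hb => hx ⟨hb, hdS⟩
        exact le_trans (le_of_not_gt this) (fold_le S t b)
    · simp only [List.foldl_cons]
      split_ifs <;> exact ih _ d hdt hdS

theorem fold_cases (S : PySem.Set Int) (L : List Int) (b : Int) :
    L.foldl (fun b d => if b < d ∧ PySem.Set.contains S d = true then d else b) b = b ∨
      (L.foldl (fun b d => if b < d ∧ PySem.Set.contains S d = true then d else b) b ∈ L ∧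
        PySem.Set.contains S
          (L.foldl (fun b d => if b < d ∧ PySem.Set.contains S d = true then d else b) b) = true) := by
  induction L generalizing b with
  | nil => exact Or.inl rfl
  | cons x t ih =>
    simp only [List.foldl_cons]
    split_ifs with hx
    · rcases ih x with h | h
      · exact Or.inr ⟨by rw [h]; exact List.mem_cons_self, by rw [h]; exact hx.2⟩
      · exact Or.inr ⟨List.mem_cons_of_mem _ h.1, h.2⟩
    · rcases ih b with h | h
      · exact Or.inl h
      · exact Or.inr ⟨List.mem_cons_of_mem _ h.1, h.2⟩

-- membership in pvGapList, index form
theorem mem_pvGapList (c : List Int) (d : Int) :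
    d ∈ pvGapList c ↔
      ∃ i j : Nat, i < j ∧ j < c.length ∧
        c.getD j 0 - c.getD i 0 = d := by
  unfold pvGapList
  rw [PySem.List.enumerate_eq_map_pyRange c 0]
  simp only [List.mem_flatMap, List.mem_map]
  constructor
  · rintro ⟨p, ⟨i, hi, rfl⟩, b, hb, rfl⟩
    obtain ⟨h0i, hilen⟩ := PySem.List.mem_pyRange_one.mp hi
    rw [PySem.List.slice_from c (show (0:Int) ≤ i + 1 by omega)] at hb
    obtain ⟨k, hk, rfl⟩ := List.mem_iff_getElem.mp hb
    have hkl : k < c.length - (i + 1).toNat := by simpa [List.length_drop] using hk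
    simp only [PySem.List.len_eq] at hilen
    refine ⟨i.toNat, (i + 1).toNat + k, by omega, by omega, ?_⟩
    have hj' : (i + 1).toNat + k < c.length := by omega
    have hi' : i.toNat < c.length := by omega
    rw [List.getElem_drop, PySem.List.pyGetD_eq_getElem c 0 h0i (by exact_mod_cast hilen),
      List.getD_eq_getElem c 0 hj', List.getD_eq_getElem c 0 hi']
  · rintro ⟨i, j, hij, hj, rfl⟩
    refine ⟨((i : Int), PySem.List.pyGetD c i 0), ⟨(i : Int), ?_, rfl⟩, c.getD j 0, ?_, ?_⟩
    · exact PySem.List.mem_pyRange_one.mpr ⟨by omega, by simp [PySem.List.len_eq]; omega⟩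
    · rw [PySem.List.slice_from c (show (0:Int) ≤ (i:Int) + 1 by omega)]
      have : ((i:Int) + 1).toNat = i + 1 := by omega
      rw [this]
      rw [List.getD_eq_getElem c 0 (by omega)]
      exact List.mem_iff_getElem.mpr ⟨j - (i+1), by simp [List.length_drop]; omega,
        by rw [List.getElem_drop]; congr 1; omega⟩
    · rw [PySem.List.pyGetD_natCast]

-- position membership: B's union-set vs A's sorted list
theorem mem_pos (fs : List Int) (limit x : Int) :
    x ∈ PySem.Set.union (PySem.Set.ofList fs) (PySem.Set.ofList [1, limit]) ↔
      x ∈ PySem.List.sorted (1 :: fs ++ [limit]) (fun y => y) := by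
  rw [PySem.Set.mem_union, PySem.Set.mem_ofList, PySem.Set.mem_ofList, PySem.List.mem_sorted]
  simp
  tauto

-- for a sorted list, a positive d is a pairwise gap iff some position shifted by d is a position
theorem gap_iff_shift (xs : List Int) (d : Int) (hd : 0 < d) :
    d ∈ pvGapList (PySem.List.sorted xs (fun y => y)) ↔
      ∃ p ∈ PySem.List.sorted xs (fun y => y),
        p + d ∈ PySem.List.sorted xs (fun y => y) := by
  set c := PySem.List.sorted xs (fun y => y) with hc
  rw [mem_pvGapList]
  constructor
  · rintro ⟨i, j, hij, hj, rfl⟩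
    have hi' : i < c.length := by omega
    refine ⟨c.getD i 0, ?_, ?_⟩
    · rw [List.getD_eq_getElem c 0 hi']
      exact List.getElem_mem _
    · have heq : c.getD i 0 + (c.getD j 0 - c.getD i 0) = c.getD j 0 := by ring
      rw [heq, List.getD_eq_getElem c 0 hj]
      exact List.getElem_mem _
  · rintro ⟨p, hp, hpd⟩
    obtain ⟨i, hi, hpi⟩ := List.mem_iff_getElem.mp hp
    obtain ⟨j, hj, hpj⟩ := List.mem_iff_getElem.mp hpd
    have hij : i < j := by
      by_contra hle
      have hmono : getElem c j hj ≤ getElem c i hi :=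
        PySem.List.sorted_id_getElem_mono xs (p := j) (q := i) (by omega) (by rw [← hc]; omega)
      rw [hpi, hpj] at hmono
      omega
    have hi' : i < c.length := by omega
    refine ⟨i, j, hij, hj, ?_⟩
    rw [List.getD_eq_getElem c 0 hj, List.getD_eq_getElem c 0 hi', hpi, hpj]
    ring

-- membership in B's gap set
theorem mem_gaps (hs : PySem.Set Int) (d : Int) :
    d ∈ PySem.Set.ofList
        (hs.flatMap (fun a => (hs.filter (fun b => decide (a < b))).map (fun b => b - a))) ↔
      0 < d ∧ ∃ p ∈ hs, p + d ∈ hs := by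
  rw [PySem.Set.mem_ofList]
  simp only [List.mem_flatMap, List.mem_map, List.mem_filter, decide_eq_true_eq]
  constructor
  · rintro ⟨a, ha, b, ⟨hb, hab⟩, rfl⟩
    exact ⟨by omega, a, ha, by simpa using hb⟩
  · rintro ⟨hd, p, hp, hpd⟩
    exact ⟨p, hp, p + d, ⟨hpd, by omega⟩, by ring⟩

-- early-exit scan: no hit
theorem scan_none (vs : PySem.Set Int) (L : List Int)
    (h : ∀ d ∈ L, vs.any (fun p => PySem.Set.contains vs (p + d)) = false) :
    pvScan vs L = -1 := by
  induction L with
  | nil => rfl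
  | cons x t ih =>
    unfold pvScan
    rw [h x List.mem_cons_self]
    exact ih (fun d hd => h d (List.mem_cons_of_mem _ hd))

-- early-exit scan on a strictly decreasing list returns the largest hit
theorem scan_hit (vs : PySem.Set Int) (L : List Int) (hL : L.Pairwise (· > ·)) (g : Int)
    (hg : g ∈ L) (hchk : vs.any (fun p => PySem.Set.contains vs (p + g)) = true)
    (hub : ∀ e ∈ L, vs.any (fun p => PySem.Set.contains vs (p + e)) = true → e ≤ g) :
    pvScan vs L = PySem.Int.mod (g * g) (10 ^ 9 + 7) := by
  induction L with
  | nil => simp at hg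
  | cons x t ih =>
    unfold pvScan
    by_cases hx : vs.any (fun p => PySem.Set.contains vs (p + x)) = true
    · rw [hx]
      simp only [if_true]
      have hxg : x ≤ g := hub x List.mem_cons_self hx
      rcases List.mem_cons.mp hg with rfl | hgt
      · rfl
      · have := (List.pairwise_cons.mp hL).1 g hgt
        omega
    · rw [Bool.eq_false_iff.mpr hx]
      simp only [Bool.false_eq_true, if_false]
      have hgt : g ∈ t := by
        rcases List.mem_cons.mp hg with rfl | hgt
        · exact absurd hchk hx
        · exact hgt
      exact ih (List.pairwise_cons.mp hL).2 hgt
        (fun e he => hub e (List.mem_cons_of_mem _ he))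

-- ===== VERDICT (by name: the statement is the Claim_ definition above) =====
theorem akit_kumar_spec : Claim_equal_akit_kumar := by
  intro m n h_fences v_fences _
  unfold Spec_akit_kumar akit_kumar akit_kumar_alt
  simp only [gapfold_eq, bestfold_eq]
  set h := PySem.List.sorted (1 :: h_fences ++ [m]) (fun x => x) with hh
  set v := PySem.List.sorted (1 :: v_fences ++ [n]) (fun x => x) with hv
  set hs := PySem.Set.union (PySem.Set.ofList h_fences) (PySem.Set.ofList [1, m]) with hhs
  set vs := PySem.Set.union (PySem.Set.ofList v_fences) (PySem.Set.ofList [1, n]) with hvs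
  set Sh := PySem.Set.ofList (pvGapList h) with hSh
  set gapsB := PySem.Set.ofList
    (hs.flatMap (fun a => (hs.filter (fun b => decide (a < b))).map (fun b => b - a))) with hgB
  set best := (pvGapList v).foldl
    (fun b d => if b < d ∧ PySem.Set.contains Sh d = true then d else b) 0 with hbest
  -- bridge: the v-side check of B
  have hchkv : ∀ d : Int, vs.any (fun p => PySem.Set.contains vs (p + d)) = true ↔
      ∃ p ∈ v, p + d ∈ v := by
    intro d
    rw [List.any_eq_true]
    constructor
    · rintro ⟨p, hp, hc⟩
      exact ⟨p, (mem_pos v_fences n p).mp hp,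
        (mem_pos v_fences n _).mp ((PySem.Set.contains_iff _ _).mp hc)⟩
    · rintro ⟨p, hp, hpd⟩
      exact ⟨p, (mem_pos v_fences n p).mpr hp,
        (PySem.Set.contains_iff _ _).mpr ((mem_pos v_fences n _).mpr hpd)⟩
  -- bridge: membership in B's scan list
  have hmemL : ∀ d : Int, d ∈ PySem.List.sorted gapsB (fun x => x) true ↔
      (0 < d ∧ d ∈ pvGapList h) := by
    intro d
    rw [PySem.List.mem_sorted, hgB, mem_gaps]
    constructor
    · rintro ⟨hd, p, hp, hpd⟩
      exact ⟨hd, (gap_iff_shift _ d hd).mpr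
        ⟨p, (mem_pos h_fences m p).mp hp, (mem_pos h_fences m _).mp hpd⟩⟩
    · rintro ⟨hd, hdg⟩
      obtain ⟨p, hp, hpd⟩ := (gap_iff_shift _ d hd).mp hdg
      exact ⟨hd, p, (mem_pos h_fences m p).mpr hp, (mem_pos h_fences m _).mpr hpd⟩
  -- B's scan list is strictly decreasing
  have hdec : (PySem.List.sorted gapsB (fun x => x) true).Pairwise (· > ·) := by
    have h1 := PySem.List.sorted_pairwise_rev (xs := gapsB) (key := fun x : Int => x)
    have h2 : (PySem.List.sorted gapsB (fun x : Int => x) true).Nodup :=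
      (PySem.List.sorted_perm gapsB (fun x : Int => x) true).nodup_iff.mpr
        (PySem.Set.nodup_ofList _)
    exact (h1.and h2).imp (fun {a b} hab => lt_of_le_of_ne hab.1 (Ne.symm hab.2))
  have hbest_le : (0:Int) ≤ best := fold_le Sh (pvGapList v) 0
  by_cases hb0 : best = 0
  · rw [if_pos hb0]
    refine (scan_none vs _ ?_).symm
    intro d hd
    by_contra hne
    have hchk : vs.any (fun p => PySem.Set.contains vs (p + d)) = true := by
      revert hne; cases vs.any (fun p => PySem.Set.contains vs (p + d)) <;> simp
    obtain ⟨hdpos, hdh⟩ := (hmemL d).mp hd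
    have hdv : d ∈ pvGapList v := (gap_iff_shift _ d hdpos).mpr ((hchkv d).mp hchk)
    have hcont : PySem.Set.contains Sh d = true :=
      (PySem.Set.contains_iff _ _).mpr ((PySem.Set.mem_ofList _ _).mpr hdh)
    have := fold_ub Sh (pvGapList v) 0 d hdv hcont
    rw [← hbest] at this
    omega
  · rw [if_neg hb0]
    have hbpos : 0 < best := lt_of_le_of_ne hbest_le (Ne.symm hb0)
    obtain ⟨hbv, hbc⟩ := (fold_cases Sh (pvGapList v) 0).resolve_left hb0
    rw [← hbest] at hbv hbc
    have hbh : best ∈ pvGapList h :=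
      (PySem.Set.mem_ofList _ _).mp ((PySem.Set.contains_iff _ _).mp hbc)
    refine (scan_hit vs _ hdec best ((hmemL best).mpr ⟨hbpos, hbh⟩) ?_ ?_).symm
    · exact (hchkv best).mpr ((gap_iff_shift _ best hbpos).mp hbv)
    · intro e he hche
      obtain ⟨hepos, heh⟩ := (hmemL e).mp he
      have hev : e ∈ pvGapList v := (gap_iff_shift _ e hepos).mpr ((hchkv e).mp hche)
      have hec : PySem.Set.contains Sh e = true :=
        (PySem.Set.contains_iff _ _).mpr ((PySem.Set.mem_ofList _ _).mpr heh)
      have := fold_ub Sh (pvGapList v) 0 e hev hec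
      rw [← hbest] at this
      exact this
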